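-- pv_equiv track=rewrite | github.com/jhnmrtnssn/advent-of-code | 2023/day13/part2.py | cluster_rows_to_int
-- ===== SOURCE A (Python) =====
-- def cluster_rows_to_int(cluster):
--     row_values = []
--     for line in cluster:
--         value = 0
--         n_smudges = line.count("#")
--         for i, char in enumerate(reversed(line)):
--             if char == "#":
--                 value += 2**i
--         row_values.append((value, n_smudges))
--     return row_values
-- ===== SOURCE B (Python) =====
-- def cluster_rows_to_int(cluster):
--     # One forward Horner pass per line: value = value*2 + bit, counting '#' in the same pass.
--     out = []
--     for line in cluster:
--         value = 0
--         n_smudges = 0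
--         for char in line:
--             bit = 1 if char == "#" else 0
--             value = value * 2 + bit
--             n_smudges += bit
--         out.append((value, n_smudges))
--     return out
-- ===== Notes on version B (the rewrite author's own statement) =====
-- stated objective: alternative
-- what changed: Replaces the reversed-enumerate loop that adds 2**i per '#' plus a separate line.count('#') pass with a single forward Horner pass (value = value*2 + bit) that accumulates the smudge count in the same loop.
import Mathlib
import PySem

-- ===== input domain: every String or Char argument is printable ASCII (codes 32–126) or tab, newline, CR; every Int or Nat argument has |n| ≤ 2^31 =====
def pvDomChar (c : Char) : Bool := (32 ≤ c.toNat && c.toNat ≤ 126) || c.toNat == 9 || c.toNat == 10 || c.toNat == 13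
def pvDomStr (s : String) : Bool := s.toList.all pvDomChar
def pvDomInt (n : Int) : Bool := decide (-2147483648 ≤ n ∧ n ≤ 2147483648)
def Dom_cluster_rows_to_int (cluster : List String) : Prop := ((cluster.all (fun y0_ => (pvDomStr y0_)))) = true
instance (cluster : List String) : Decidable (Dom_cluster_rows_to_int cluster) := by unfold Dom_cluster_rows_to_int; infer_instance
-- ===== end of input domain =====

-- B replaces A's reversed-enumerate 2**i summation plus separate count('#') pass
-- by a single forward Horner pass accumulating value and smudge count together (alternative decomposition).

-- ===== PORT A =====
def cluster_rows_to_int (cluster : List String) : List (Int × Int) :=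
  cluster.foldl (fun row_values line =>
    let n_smudges : Int := (PySem.Str.count line "#" : Int)
    let value : Int := (PySem.List.enumerate line.toList.reverse 0).foldl
      (fun value ic => if ic.2 = '#' then value + 2 ^ ic.1.toNat else value) 0
    row_values ++ [(value, n_smudges)]) []

-- ===== PORT B =====
def pvRowHorner (line : String) : Int × Int :=
  line.toList.foldl (fun vs ch =>
    let bit : Int := if ch = '#' then 1 else 0
    (vs.1 * 2 + bit, vs.2 + bit)) (0, 0)

def cluster_rows_to_int_alt (cluster : List String) : List (Int × Int) :=
  cluster.map pvRowHorner

-- ===== PRECONDITION & SPEC =====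
def Spec_cluster_rows_to_int (cluster : List String) (out : List (Int × Int)) : Prop := out = cluster_rows_to_int_alt cluster
instance (cluster : List String) (out : List (Int × Int)) : Decidable (Spec_cluster_rows_to_int cluster out) := by unfold Spec_cluster_rows_to_int; infer_instance

-- ===== CLAIM (what is proved, stated in full; the proofs are below) =====
def Claim_equal_cluster_rows_to_int : Prop := ∀ (cluster : List String), Dom_cluster_rows_to_int cluster → Spec_cluster_rows_to_int cluster (cluster_rows_to_int cluster)

-- ===== LEMMAS AND PROOFS =====

-- A's per-line value: sum of 2^i over '#' positions in the reversed line
def pvValA (l : List Char) : Int :=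
  (PySem.List.enumerate l.reverse 0).foldl
    (fun value ic => if ic.2 = '#' then value + 2 ^ ic.1.toNat else value) 0

lemma pvValA_nil : pvValA [] = 0 := rfl

lemma pvValA_cons (c : Char) (t : List Char) :
    pvValA (c :: t) = (if c = '#' then (2 : Int) ^ t.length else 0) + pvValA t := by
  unfold pvValA
  rw [List.reverse_cons, PySem.List.enumerate_append, List.foldl_append]
  simp [PySem.List.enumerate]
  split_ifs <;> ring

-- single-char str.count is List.count
lemma count_go_single (c : Char) : ∀ (fuel : Nat) (l : List Char) (acc : Nat),
    l.length ≤ fuel → PySem.Chars.count.go [c] fuel l acc = acc + l.count c := by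
  intro fuel
  induction fuel with
  | zero =>
    intro l acc h
    cases l with
    | nil => simp [PySem.Chars.count.go]
    | cons x t => simp at h
  | succ n ih =>
    intro l acc h
    cases l with
    | nil => simp [PySem.Chars.count.go]
    | cons x t =>
      simp only [PySem.Chars.count.go]
      by_cases hx : c = x
      · subst hx
        simp only [List.isPrefixOf, List.count_cons]
        simp only [beq_self_eq_true, Bool.true_and, if_true]
        rw [show List.drop [c].length (c :: t) = t from rfl, ih t (acc + 1) (by simpa using h)]
        omega
      · have hb : ([c].isPrefixOf (x :: t)) = false := by
          simp [List.isPrefixOf, beq_eq_false_iff_ne, hx]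
        rw [hb]
        simp only [Bool.false_eq_true, if_false]
        rw [ih t acc (by simpa using h)]
        simp [(by simpa [eq_comm] using hx : ¬ x = c)]

lemma str_count_single (s : String) :
    PySem.Str.count s "#" = s.toList.count '#' := by
  have : PySem.Chars.count s.toList ['#'] = s.toList.count '#' := by
    unfold PySem.Chars.count
    rw [if_neg (by simp)]
    simpa using count_go_single '#' s.toList.length s.toList 0 le_rfl
  simpa [PySem.Str.count] using this

-- B's Horner fold from an arbitrary accumulator
lemma horner_fold (l : List Char) : ∀ (v s : Int),
    l.foldl (fun vs ch =>
      let bit : Int := if ch = '#' then 1 else 0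
      (vs.1 * 2 + bit, vs.2 + bit)) (v, s)
    = (v * 2 ^ l.length + pvValA l, s + l.count '#') := by
  induction l with
  | nil => intro v s; simp [pvValA_nil]
  | cons c t ih =>
    intro v s
    simp only [List.foldl_cons, ih, pvValA_cons, List.count_cons, List.length_cons]
    by_cases hc : c = '#'
    · simp only [hc, if_true, Prod.mk.injEq]
      exact ⟨by ring, by simp; ring⟩
    · simp only [hc, if_false, Prod.mk.injEq]
      exact ⟨by ring, by simp [hc]⟩

lemma row_eq (line : String) :
    (pvValA line.toList, (PySem.Str.count line "#" : Int)) = pvRowHorner line := by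
  unfold pvRowHorner
  rw [horner_fold line.toList 0 0, str_count_single]
  simp

-- ===== VERDICT (by name: the statement is the Claim_ definition above) =====
theorem cluster_rows_to_int_spec : Claim_equal_cluster_rows_to_int := by
  intro cluster _
  show cluster_rows_to_int cluster = cluster_rows_to_int_alt cluster
  unfold cluster_rows_to_int cluster_rows_to_int_alt
  rw [PySem.List.foldl_append_singleton_eq_map]
  simp only [List.nil_append]
  exact List.map_congr_left (fun line _ => row_eq line)
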